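-- pv_equiv track=rewrite | github.com/Sornphert/Movexercise8-analytics | utils/metrics.py | get_event_day_dates
-- ===== SOURCE A (Python) =====
-- def get_event_day_dates(
--     webinars_dict: dict,
--     meeting_id: str,
-- ) -> tuple[str | None, str | None]:
--     """Return (day1_date, day2_date) ISO strings for a meeting_id."""
--     sessions = [w for w in webinars_dict.values() if w["meeting_id"] == meeting_id]
--     sessions.sort(key=lambda w: w["date"])
--     d1 = sessions[0]["date"] if sessions else None
--     d2 = sessions[1]["date"] if len(sessions) > 1 else None
--     return d1, d2
-- ===== SOURCE B (Python) =====
-- def get_event_day_dates(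
--     webinars_dict: dict,
--     meeting_id: str,
-- ) -> tuple[str | None, str | None]:
--     """Return (day1_date, day2_date) ISO strings for a meeting_id."""
--     d1 = None
--     d2 = None
--     for w in webinars_dict.values():
--         if w["meeting_id"] == meeting_id:
--             d = w["date"]
--             if d1 is None or d < d1:
--                 d2 = d1
--                 d1 = d
--             elif d2 is None or d < d2:
--                 d2 = d
--     return d1, d2
-- ===== Notes on version B (the rewrite author's own statement) =====
-- stated objective: faster
-- what changed: Replaces build-filtered-list-then-sort with a single linear pass that tracks the smallest and second-smallest date (two running minima), removing the O(n log n) sort.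
import Mathlib
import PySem

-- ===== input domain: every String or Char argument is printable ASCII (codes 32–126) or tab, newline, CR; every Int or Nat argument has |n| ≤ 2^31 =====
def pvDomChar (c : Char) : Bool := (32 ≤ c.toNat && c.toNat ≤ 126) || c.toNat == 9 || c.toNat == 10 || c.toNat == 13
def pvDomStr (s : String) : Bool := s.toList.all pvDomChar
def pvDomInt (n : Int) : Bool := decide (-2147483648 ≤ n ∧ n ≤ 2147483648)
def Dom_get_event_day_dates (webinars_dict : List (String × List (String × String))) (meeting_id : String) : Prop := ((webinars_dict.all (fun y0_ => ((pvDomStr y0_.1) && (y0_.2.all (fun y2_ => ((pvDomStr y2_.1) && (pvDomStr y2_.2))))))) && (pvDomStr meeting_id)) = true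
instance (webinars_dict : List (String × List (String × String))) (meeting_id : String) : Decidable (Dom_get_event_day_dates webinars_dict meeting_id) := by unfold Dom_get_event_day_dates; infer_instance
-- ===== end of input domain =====

-- B replaces filter-then-sort by a single linear pass keeping the two smallest dates (faster: no sort).

-- ===== PORT A =====
def get_event_day_dates (webinars_dict : List (String × List (String × String))) (meeting_id : String) : Option String × Option String :=
  let sessions := (webinars_dict.map Prod.snd).filter
    (fun w => (PySem.Dict.mk w).get? "meeting_id" == some meeting_id)
  let sessions := PySem.List.sorted sessions (fun w => ((PySem.Dict.mk w).get? "date").getD "")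
  let d1 := match sessions with
    | [] => none
    | w :: _ => (PySem.Dict.mk w).get? "date"
  let d2 := match sessions with
    | _ :: w :: _ => (PySem.Dict.mk w).get? "date"
    | _ => none
  (d1, d2)

-- ===== PORT B =====
-- the two-minima update of B's loop body (after the membership test)
def pvStep (st : Option String × Option String) (d : String) : Option String × Option String :=
  if (match st.1 with | none => true | some a => decide (d < a)) then (some d, st.1)
  else if (match st.2 with | none => true | some a => decide (d < a)) then (st.1, some d)
  else st

def get_event_day_dates_alt (webinars_dict : List (String × List (String × String))) (meeting_id : String) : Option String × Option String :=
  webinars_dict.foldl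
    (fun st kv =>
      if (PySem.Dict.mk kv.2).get? "meeting_id" == some meeting_id then
        pvStep st (((PySem.Dict.mk kv.2).get? "date").getD "")
      else st)
    (none, none)

-- ===== PRECONDITION & SPEC =====
-- Pre_ excludes exactly the KeyError inputs: a session dict without the "meeting_id" key,
-- or a session with the matching meeting_id but no "date" key (Python A raises KeyError there).
def Pre_get_event_day_dates (webinars_dict : List (String × List (String × String))) (meeting_id : String) : Prop :=
  ∀ w ∈ webinars_dict.map Prod.snd,
    (PySem.Dict.mk w).get? "meeting_id" ≠ none ∧
    ((PySem.Dict.mk w).get? "meeting_id" = some meeting_id → (PySem.Dict.mk w).get? "date" ≠ none)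
instance (webinars_dict : List (String × List (String × String))) (meeting_id : String) : Decidable (Pre_get_event_day_dates webinars_dict meeting_id) := by unfold Pre_get_event_day_dates; infer_instance

def pvWitness_get_event_day_dates : (List (String × List (String × String))) × String :=
  ([("a", [("meeting_id", "m"), ("date", "2024-01-02")]),
    ("b", [("meeting_id", "m"), ("date", "2024-01-01")]),
    ("c", [("meeting_id", "x"), ("date", "2024-01-03")])], "m")

def Spec_get_event_day_dates (webinars_dict : List (String × List (String × String))) (meeting_id : String) (out : Option String × Option String) : Prop := out = get_event_day_dates_alt webinars_dict meeting_id
instance (webinars_dict : List (String × List (String × String))) (meeting_id : String) (out : Option String × Option String) : Decidable (Spec_get_event_day_dates webinars_dict meeting_id out) := by unfold Spec_get_event_day_dates; infer_instance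

-- ===== CLAIM (what is proved, stated in full; the proofs are below) =====
def Claim_equal_get_event_day_dates : Prop := ∀ (webinars_dict : List (String × List (String × String))) (meeting_id : String), Dom_get_event_day_dates webinars_dict meeting_id → Pre_get_event_day_dates webinars_dict meeting_id → Spec_get_event_day_dates webinars_dict meeting_id (get_event_day_dates webinars_dict meeting_id)

-- ===== LEMMAS AND PROOFS =====

-- first two elements of a list, as A extracts them from the sorted list
def pvFirstTwo (l : List String) : Option String × Option String := (l[0]?, l[1]?)

-- one two-minima update = first two elements after inserting into a list
theorem pvStep_insertBy (ys : List String) (x : String) :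
    pvFirstTwo (PySem.List.insertBy (fun a b => decide (a < b)) x ys) = pvStep (pvFirstTwo ys) x := by
  match ys with
  | [] => simp [PySem.List.insertBy, pvStep, pvFirstTwo]
  | [a] =>
    simp only [PySem.List.insertBy, pvStep, pvFirstTwo]
    by_cases h : x < a <;> simp [h]
  | a :: b :: t =>
    simp only [PySem.List.insertBy, pvStep, pvFirstTwo]
    by_cases h1 : x < a
    · simp [h1]
    · by_cases h2 : x < b <;> simp [h1, h2]

-- the whole two-minima fold = first two elements of the insertion-sort fold
theorem pvFold_insertBy (l : List String) (ys : List String) :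
    l.foldl pvStep (pvFirstTwo ys) =
      pvFirstTwo (l.foldl (fun acc x => PySem.List.insertBy (fun a b => decide (a < b)) x acc) ys) := by
  induction l generalizing ys with
  | nil => rfl
  | cons x t ih =>
    simp only [List.foldl_cons]
    rw [← pvStep_insertBy ys x, ih]

theorem pvTwoMin_sorted (l : List String) :
    l.foldl pvStep (none, none) = pvFirstTwo (PySem.List.sorted l (fun x => x)) := by
  have h := pvFold_insertBy l []
  simpa [pvFirstTwo, PySem.List.sorted_eq_foldl_insertBy l (fun x => x)] using h

-- mapping the sort key over the key-sorted list = sorting the mapped keys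
theorem pvMap_sorted {α : Type} (S : List α) (k : α → String) :
    (PySem.List.sorted S k).map k = PySem.List.sorted (S.map k) (fun x => x) := by
  apply List.eq_of_perm_of_sorted (le := fun a b => a ≤ b)
  · exact fun a b _ _ hab hba => le_antisymm hab hba
  · exact PySem.List.sorted_map_key_pairwise S k
  · exact PySem.List.sorted_pairwise (S.map k) (fun x => x)
  · exact ((PySem.List.sorted_perm S k false).map k).trans
      (PySem.List.sorted_perm (S.map k) (fun x => x) false).symm

-- ===== VERDICT (by name: the statement is the Claim_ definition above) =====
theorem get_event_day_dates_spec : Claim_equal_get_event_day_dates := by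
  intro wd mid _ hpre
  unfold Spec_get_event_day_dates get_event_day_dates get_event_day_dates_alt
  set p : List (String × String) → Bool :=
    fun w => (PySem.Dict.mk w).get? "meeting_id" == some mid with hp
  set k : List (String × String) → String :=
    fun w => ((PySem.Dict.mk w).get? "date").getD "" with hk
  set S : List (List (String × String)) := (wd.map Prod.snd).filter p with hS
  -- B's fold reduces to the two-minima fold over the filtered sessions' dates
  have hB : wd.foldl
      (fun st kv => if p kv.2 then pvStep st (k kv.2) else st) ((none : Option String), (none : Option String))
      = (S.map k).foldl pvStep (none, none) := by
    rw [← List.foldl_map (f := Prod.snd) (g := fun st w => if p w then pvStep st (k w) else st),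
        PySem.List.foldl_if_eq_foldl_filter,
        ← List.foldl_map (f := k) (g := pvStep)]
  rw [hB, pvTwoMin_sorted, ← pvMap_sorted S k]
  -- every session in the sorted filtered list has a "date" key, worth exactly its sort key
  have hdate : ∀ w ∈ PySem.List.sorted S k, (PySem.Dict.mk w).get? "date" = some (k w) := by
    intro w hw
    rw [PySem.List.mem_sorted] at hw
    have hmem := List.of_mem_filter hw
    have hfil := List.mem_of_mem_filter hw
    rcases hpre w hfil with ⟨_, h2⟩
    have : (PySem.Dict.mk w).get? "meeting_id" = some mid := by
      simpa [hp] using hmem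
    rcases Option.ne_none_iff_exists'.mp (h2 this) with ⟨d, hd⟩
    simp [hk, hd]
  match hE : PySem.List.sorted S k with
  | [] => simp [hE, pvFirstTwo]
  | [w] =>
    have h1 := hdate w (by rw [hE]; simp)
    simp [hE, pvFirstTwo, h1]
  | w :: w' :: t =>
    have h1 := hdate w (by rw [hE]; simp)
    have h2 := hdate w' (by rw [hE]; simp)
    simp [hE, pvFirstTwo, h1, h2]
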